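-- pv_equiv track=rewrite | github.com/andrewp83/otus_algo | 02_lucky/lucky.py | lucky_count
-- ===== SOURCE A (Python) =====
-- from functools import reduce
--
-- def lucky_count(n):
--     digits_sum_count = [1] * 10
--     for _ in range(n - 1):
--         current_digits_sum_count = [0] * (len(digits_sum_count) + 9)
--         for i in range(10):
--             for k in range(len(digits_sum_count)):
--                 current_digits_sum_count[i + k] += digits_sum_count[k]
--         digits_sum_count = current_digits_sum_count
--     return reduce(lambda total, current: total + current**2, digits_sum_count)
-- ===== SOURCE B (Python) =====
-- def lucky_count(n):
--     counts = [1] * 10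
--     for _ in range(n - 1):
--         m = len(counts)
--         nxt = []
--         window = 0
--         for s in range(m + 9):
--             if s < m:
--                 window += counts[s]
--             if s >= 10:
--                 window -= counts[s - 10]
--             nxt.append(window)
--         counts = nxt
--     return sum(c * c for c in counts)
-- ===== Notes on version B (the rewrite author's own statement) =====
-- stated objective: alternative
-- what changed: Replaces A's nested shift-and-add convolution per row (one inner pass per digit value) and the reduce over squares by a single-pass sliding-window prefix accumulation (one add and one subtract per cell) and a plain sum of squares.
import Mathlib
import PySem

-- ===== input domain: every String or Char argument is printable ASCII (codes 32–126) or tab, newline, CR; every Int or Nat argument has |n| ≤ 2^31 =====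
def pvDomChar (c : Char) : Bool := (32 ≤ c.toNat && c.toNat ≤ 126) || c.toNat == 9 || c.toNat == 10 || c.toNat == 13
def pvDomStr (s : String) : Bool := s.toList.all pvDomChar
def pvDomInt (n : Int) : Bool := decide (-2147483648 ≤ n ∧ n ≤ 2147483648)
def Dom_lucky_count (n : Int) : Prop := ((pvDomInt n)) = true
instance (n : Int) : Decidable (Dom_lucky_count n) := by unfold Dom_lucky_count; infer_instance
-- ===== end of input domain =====

-- B replaces A's nested shift-and-add convolution per row by a one-pass sliding-window
-- accumulation (one add and one subtract per cell) and the reduce by a plain sum of squares.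

-- ===== PORT A =====
-- one pass of A's inner double loop: current[i + k] += digits_sum_count[k] for i < 10, k < m
def stepA (ds : List Int) : List Int :=
  (List.range 10).foldl
    (fun cur i =>
      (List.range ds.length).foldl
        (fun cur2 k => cur2.set (i + k) (cur2.getD (i + k) 0 + ds.getD k 0))
        cur)
    (List.replicate (ds.length + 9) 0)

-- for _ in range(n - 1): digits_sum_count = stepA digits_sum_count
def loopA : Nat → List Int → List Int
  | 0, ds => ds
  | k + 1, ds => loopA k (stepA ds)

def lucky_count (n : Int) : Int :=
  let ds := loopA (n - 1).toNat (List.replicate 10 1)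
  -- reduce(lambda total, current: total + current ** 2, ds) is seeded with the FIRST element;
  -- ds always has length ≥ 10, so the [] case (where Python's reduce raises) is unreachable.
  match ds with
  | [] => 0
  | h :: t => t.foldl (fun total current => total + current * current) h

-- ===== PORT B =====
-- one iteration of B's inner loop: window += counts[s] (s < m); window -= counts[s-10] (s ≥ 10)
def winStep (ds : List Int) (st : List Int × Int) (s : Nat) : List Int × Int :=
  let w1 := st.2 + (if s < ds.length then ds.getD s 0 else 0)
  let w2 := w1 - (if 10 ≤ s then ds.getD (s - 10) 0 else 0)
  (st.1 ++ [w2], w2)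

-- B's sliding-window pass over s in range(m + 9), state = (nxt, window)
def stepB (ds : List Int) : List Int :=
  ((List.range (ds.length + 9)).foldl (winStep ds) ([], 0)).1

-- for _ in range(n - 1): counts = stepB counts
def loopB : Nat → List Int → List Int
  | 0, ds => ds
  | k + 1, ds => loopB k (stepB ds)

def lucky_count_alt (n : Int) : Int :=
  let counts := loopB (n - 1).toNat (List.replicate 10 1)
  counts.foldl (fun acc c => acc + c * c) 0

-- ===== PRECONDITION & SPEC =====
def Spec_lucky_count (n : Int) (out : Int) : Prop := out = lucky_count_alt n
instance (n : Int) (out : Int) : Decidable (Spec_lucky_count n out) := by unfold Spec_lucky_count; infer_instance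

-- ===== CLAIM (what is proved, stated in full; the proofs are below) =====
def Claim_equal_lucky_count : Prop := ∀ (n : Int), Dom_lucky_count n → Spec_lucky_count n (lucky_count n)

-- ===== LEMMAS AND PROOFS =====

def Wf (ds : List Int) : Nat → Int
  | 0 => 0
  | s + 1 => Wf ds s + (if s < ds.length then ds.getD s 0 else 0)
                     - (if 10 ≤ s then ds.getD (s - 10) 0 else 0)

def Tf (ds : List Int) (j i : Nat) : Int :=
  if i ≤ j ∧ j - i < ds.length then ds.getD (j - i) 0 else 0

def Gf (ds : List Int) (j : Nat) : Int := ∑ i ∈ Finset.range 10, Tf ds j i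

theorem innerA_spec (ds : List Int) (i : Nat) (m : Nat) : ∀ (cur : List Int),
    (((List.range m).foldl
        (fun cur2 k => cur2.set (i + k) (cur2.getD (i + k) 0 + ds.getD k 0)) cur).length
      = cur.length)
    ∧ ∀ j, ((List.range m).foldl
        (fun cur2 k => cur2.set (i + k) (cur2.getD (i + k) 0 + ds.getD k 0)) cur).getD j 0
      = cur.getD j 0 + (if i ≤ j ∧ j < i + m ∧ j < cur.length then ds.getD (j - i) 0 else 0) := by
  induction m with
  | zero =>
    intro cur
    constructor
    · rfl
    · intro j; simp only [List.range_zero, List.foldl_nil]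
      rw [if_neg (by omega)]; omega
  | succ m ih =>
    intro cur
    rw [List.range_succ, List.foldl_append, List.foldl_cons, List.foldl_nil]
    obtain ⟨hlen, hget⟩ := ih cur
    set L := (List.range m).foldl
        (fun cur2 k => cur2.set (i + k) (cur2.getD (i + k) 0 + ds.getD k 0)) cur with hL
    constructor
    · rw [List.length_set, hlen]
    · intro j
      by_cases hj : j = i + m
      · subst hj
        by_cases hr : i + m < cur.length
        · rw [List.getD_eq_getElem?_getD, List.getElem?_set_self (by rw [hlen]; omega), Option.getD_some]
          rw [hget, if_neg (by omega), if_pos ⟨by omega, by omega, hr⟩]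
          simp only [Nat.add_sub_cancel_left]
          ring
        · rw [List.getD_eq_getElem?_getD, List.getElem?_set, if_pos rfl, hlen, if_neg (by omega),
            Option.getD_none, List.getD_eq_default _ _ (by omega), if_neg (by omega)]
          omega
      · rw [List.getD_eq_getElem?_getD, List.getElem?_set_ne (by omega), ← List.getD_eq_getElem?_getD, hget]
        congr 1
        by_cases h1 : i ≤ j ∧ j < i + m ∧ j < cur.length
        · rw [if_pos h1, if_pos ⟨h1.1, by omega, h1.2.2⟩]
        · rw [if_neg h1, if_neg (by omega)]


theorem outerA_spec (ds : List Int) : ∀ (I : Nat) (cur : List Int),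
    (((List.range I).foldl
      (fun cur i =>
        (List.range ds.length).foldl
          (fun cur2 k => cur2.set (i + k) (cur2.getD (i + k) 0 + ds.getD k 0)) cur) cur).length
      = cur.length)
    ∧ ∀ j, ((List.range I).foldl
      (fun cur i =>
        (List.range ds.length).foldl
          (fun cur2 k => cur2.set (i + k) (cur2.getD (i + k) 0 + ds.getD k 0)) cur) cur).getD j 0
      = cur.getD j 0 + ∑ i ∈ Finset.range I,
          (if i ≤ j ∧ j < i + ds.length ∧ j < cur.length then ds.getD (j - i) 0 else 0) := by
  intro I
  induction I with
  | zero => intro cur; simp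
  | succ I ih =>
    intro cur
    rw [List.range_succ, List.foldl_append, List.foldl_cons, List.foldl_nil]
    obtain ⟨hlen, hget⟩ := ih cur
    obtain ⟨hlen2, hget2⟩ := innerA_spec ds I ds.length
      ((List.range I).foldl
        (fun cur i =>
          (List.range ds.length).foldl
            (fun cur2 k => cur2.set (i + k) (cur2.getD (i + k) 0 + ds.getD k 0)) cur) cur)
    refine ⟨hlen2.trans hlen, fun j => ?_⟩
    rw [hget2, hget, hlen, Finset.sum_range_succ]
    ring

theorem stepA_spec (ds : List Int) :
    (stepA ds).length = ds.length + 9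
    ∧ ∀ j, j < ds.length + 9 → (stepA ds).getD j 0 = Gf ds j := by
  obtain ⟨hlen, hget⟩ := outerA_spec ds 10 (List.replicate (ds.length + 9) 0)
  refine ⟨by simpa using hlen, fun j hj => ?_⟩
  unfold stepA
  have hrep : (List.replicate (ds.length + 9) (0 : Int)).getD j 0 = 0 := by
    simp [List.getD_eq_getElem?_getD, hj]
  rw [hget, hrep, zero_add]
  simp only [List.length_replicate]
  refine Finset.sum_congr rfl fun i hi => ?_
  unfold Tf
  split_ifs with h1 h2 h2 <;> first | rfl | omega

theorem Wf_eq_Gf (ds : List Int) : ∀ s, s < ds.length + 9 → Wf ds (s + 1) = Gf ds s := by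
  intro s
  induction s with
  | zero =>
    intro _
    show (0 : Int) + (if 0 < ds.length then ds.getD 0 0 else 0)
        - (if 10 ≤ 0 then ds.getD (0 - 10) 0 else 0) = Gf ds 0
    rw [Gf, Finset.sum_range_succ']
    have hz : ∀ i ∈ Finset.range 9, Tf ds 0 (i + 1) = 0 := by
      intro i _; simp [Tf]
    rw [Finset.sum_congr rfl hz, Finset.sum_const_zero]
    simp [Tf]
  | succ s ih =>
    intro hs
    have hshift : ∀ i, i ∈ Finset.range 9 → Tf ds (s + 1) (i + 1) = Tf ds s i := by
      intro i _; simp [Tf, Nat.succ_sub_succ]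
    have hR : Gf ds (s + 1) = Tf ds (s + 1) 0 + ∑ i ∈ Finset.range 9, Tf ds s i := by
      rw [Gf, Finset.sum_range_succ', Finset.sum_congr rfl hshift]
      ring
    have hL : Gf ds s = ∑ i ∈ Finset.range 9, Tf ds s i + Tf ds s 9 := by
      rw [Gf]; exact Finset.sum_range_succ _ _
    have h0 : Tf ds (s + 1) 0 = (if s + 1 < ds.length then ds.getD (s + 1) 0 else 0) := by
      simp [Tf]
    have h9 : Tf ds s 9 = (if 10 ≤ s + 1 then ds.getD (s + 1 - 10) 0 else 0) := by
      unfold Tf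
      split_ifs with h1 h2 h2
      · congr 1
      · omega
      · omega
      · rfl
    show Wf ds (s + 1) + _ - _ = _
    rw [ih (by omega), hR, hL, h0, h9]
    ring

theorem stepB_fold_spec (ds : List Int) : ∀ (S : Nat),
    (((List.range S).foldl
      (winStep ds) ([], 0)).2 = Wf ds S)
    ∧ (((List.range S).foldl
      (winStep ds) ([], 0)).1.length = S)
    ∧ ∀ j, j < S → ((List.range S).foldl
      (winStep ds) ([], 0)).1.getD j 0 = Wf ds (j + 1) := by
  intro S
  induction S with
  | zero => simp [Wf]
  | succ S ih =>
    obtain ⟨h2, hlen, hget⟩ := ih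
    rw [List.range_succ, List.foldl_append, List.foldl_cons, List.foldl_nil]
    refine ⟨by simp [winStep, h2, Wf], by simp [winStep, hlen], fun j hj => ?_⟩
    simp only [winStep]
    by_cases hjS : j < S
    · have h' : j < ((List.range S).foldl (winStep ds) ([], 0)).1.length := by
        rw [hlen]; exact hjS
      rw [List.getD_eq_getElem?_getD, List.getElem?_append_left h',
        ← List.getD_eq_getElem?_getD, hget j hjS]
    · have hjeq : j = S := by omega
      rw [hjeq]
      have h'' : ((List.range S).foldl (winStep ds) ([], 0)).1.length ≤ S := le_of_eq hlen
      rw [List.getD_eq_getElem?_getD, List.getElem?_append_right h'', hlen]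
      simp [h2, Wf]

theorem stepB_len (ds : List Int) : (stepB ds).length = ds.length + 9 :=
  (stepB_fold_spec ds (ds.length + 9)).2.1

theorem stepB_getD (ds : List Int) (j : Nat) (hj : j < ds.length + 9) :
    (stepB ds).getD j 0 = Wf ds (j + 1) :=
  (stepB_fold_spec ds (ds.length + 9)).2.2 j hj

theorem stepA_eq_stepB (ds : List Int) : stepA ds = stepB ds := by
  obtain ⟨haL, haG⟩ := stepA_spec ds
  apply List.ext_getElem (by rw [haL, stepB_len])
  intro j hja hjb
  have hj : j < ds.length + 9 := by omega
  have e1 := haG j hj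
  have e2 := stepB_getD ds j hj
  rw [List.getD_eq_getElem?_getD, List.getElem?_eq_getElem hja, Option.getD_some] at e1
  rw [List.getD_eq_getElem?_getD, List.getElem?_eq_getElem hjb, Option.getD_some] at e2
  rw [e1, e2, Wf_eq_Gf ds j hj]

theorem stepB_head (ds : List Int) (h : ds ≠ []) :
    (stepB ds).getD 0 0 = ds.getD 0 0 ∧ stepB ds ≠ [] := by
  have hm : 0 < ds.length := List.length_pos_iff.mpr h
  constructor
  · rw [stepB_getD ds 0 (by omega)]
    simp [Wf, hm]
  · intro hnil
    have hL := stepB_len ds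
    rw [hnil] at hL
    simp at hL

theorem loopA_eq_loopB (k : Nat) : ∀ ds, loopA k ds = loopB k ds := by
  induction k with
  | zero => intro ds; rfl
  | succ k ih => intro ds; simp [loopA, loopB, stepA_eq_stepB, ih]

theorem loopB_head (k : Nat) : ∀ ds, ds ≠ [] → ds.getD 0 0 = 1 →
    (loopB k ds ≠ [] ∧ (loopB k ds).getD 0 0 = 1) := by
  induction k with
  | zero => intro ds h1 h2; exact ⟨h1, h2⟩
  | succ k ih =>
    intro ds h1 h2
    obtain ⟨g1, g2⟩ := stepB_head ds h1
    exact ih (stepB ds) g2 (g1.trans h2)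

-- ===== VERDICT (by name: the statement is the Claim_ definition above) =====
theorem lucky_count_spec : Claim_equal_lucky_count := by
  intro n _
  unfold Spec_lucky_count lucky_count lucky_count_alt
  rw [loopA_eq_loopB]
  obtain ⟨hne, hhd⟩ := loopB_head (n - 1).toNat (List.replicate 10 1) (by simp) (by simp)
  cases hds : loopB (n - 1).toNat (List.replicate 10 1) with
  | nil => exact absurd hds hne
  | cons h t =>
    rw [hds] at hhd
    simp only [List.getD_eq_getElem?_getD, List.getElem?_cons_zero, Option.getD_some] at hhd
    simp [hhd]
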